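-- pv_equiv track=rewrite | github.com/IKACE/agent-secure-code | analysis/aggregate_codeql_reports.py | build_summary_by_repo_and_rule
-- ===== SOURCE A (Python) =====
-- from collections import defaultdict
-- from typing import Any, Dict, Iterable, List, Tuple
--
-- def build_summary_by_repo_and_rule(
--     findings: Iterable[Dict[str, Any]]
-- ) -> Dict[str, Dict[str, int]]:
--     """
--     Build a nested summary:
--
--     {
--         "owner/repo": {
--             "rule_id": count,
--             ...
--         },
--         ...
--     }
--     """
--     summary: Dict[str, Dict[str, int]] = defaultdict(lambda: defaultdict(int))
--
--     for f in findings: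
--         repo = f.get("repo") or ""
--         rule_id = f.get("rule_id") or ""
--         if not repo or not rule_id:
--             continue
--         summary[repo][rule_id] += 1
--
--     # Convert nested defaultdicts to plain dicts
--     return {repo: dict(rules) for repo, rules in summary.items()}
-- ===== SOURCE B (Python) =====
-- def build_summary_by_repo_and_rule(findings):
--     # One pass collecting the valid (repo, rule_id) pairs, then a declarative
--     # dedup-and-count reshaping instead of incremental nested defaultdicts.
--     pairs = []
--     for f in findings:
--         repo = f.get("repo") or ""
--         rule_id = f.get("rule_id") or ""
--         if repo and rule_id:
--             pairs.append((repo, rule_id))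
--     return {
--         repo: {
--             rule: pairs.count((repo, rule))
--             for rule in dict.fromkeys(u for r, u in pairs if r == repo)
--         }
--         for repo in dict.fromkeys(r for r, _ in pairs)
--     }
-- ===== Notes on version B (the rewrite author's own statement) =====
-- stated objective: alternative
-- what changed: A builds the nested summary incrementally in a defaultdict-of-defaultdicts while iterating; B collects the valid (repo, rule_id) pairs in one flat pass and then reshapes them declaratively with ordered dedup (dict.fromkeys) and pairs.count, never maintaining a nested mutable structure.
import Mathlib
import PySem

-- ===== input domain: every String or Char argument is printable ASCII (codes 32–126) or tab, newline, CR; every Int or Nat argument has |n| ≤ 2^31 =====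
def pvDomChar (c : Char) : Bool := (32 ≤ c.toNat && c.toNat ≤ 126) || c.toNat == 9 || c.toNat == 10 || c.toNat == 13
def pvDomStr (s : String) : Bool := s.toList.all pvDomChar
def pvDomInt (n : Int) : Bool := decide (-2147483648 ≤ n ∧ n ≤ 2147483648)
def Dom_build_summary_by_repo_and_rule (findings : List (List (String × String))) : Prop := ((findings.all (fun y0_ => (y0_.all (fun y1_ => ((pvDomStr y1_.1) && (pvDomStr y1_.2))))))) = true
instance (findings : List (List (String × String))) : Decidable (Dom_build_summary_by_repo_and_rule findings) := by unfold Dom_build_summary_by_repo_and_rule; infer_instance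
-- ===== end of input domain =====

-- B replaces A's incremental nested-defaultdict build by a pair-collecting pass plus a
-- declarative dedup-and-count reshaping (objective: alternative decomposition, not faster).

-- ===== PORT A =====
-- shared helper: Python's `f.get(k) or ""` on an association list (first match; "" stays "")
def pvGetOrEmpty (f : List (String × String)) (k : String) : String :=
  match f.find? (fun p => p.1 == k) with
  | some p => p.2
  | none => ""

def build_summary_by_repo_and_rule (findings : List (List (String × String))) : List (String × List (String × Int)) :=
  -- summary = defaultdict(lambda: defaultdict(int)); for f in findings: … summary[repo][rule_id] += 1
  let summary : PySem.Dict String (PySem.Dict String Int) :=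
    findings.foldl (fun d f =>
      let repo := pvGetOrEmpty f "repo"
      let rule_id := pvGetOrEmpty f "rule_id"
      if repo == "" || rule_id == "" then d
      else d.insert repo ((d.getD repo PySem.Dict.empty).modify rule_id 0 (· + 1)))
      PySem.Dict.empty
  -- {repo: dict(rules) for repo, rules in summary.items()}
  summary.items.map (fun p => (p.1, p.2.items))

-- ===== PORT B =====
def build_summary_by_repo_and_rule_alt (findings : List (List (String × String))) : List (String × List (String × Int)) :=
  -- pairs = []; for f in findings: … if repo and rule_id: pairs.append((repo, rule_id))
  let pairs : List (String × String) :=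
    findings.foldl (fun acc f =>
      let repo := pvGetOrEmpty f "repo"
      let rule_id := pvGetOrEmpty f "rule_id"
      if (repo != "") && (rule_id != "") then acc ++ [(repo, rule_id)] else acc) []
  -- nested dict comprehension over dict.fromkeys(…) with pairs.count((repo, rule))
  (PySem.List.dedup (pairs.map (·.1))).map (fun repo =>
    (repo, (PySem.List.dedup ((pairs.filter (fun p => p.1 == repo)).map (·.2))).map
      (fun rule => (rule, (PySem.List.count pairs (repo, rule) : Int)))))

-- ===== PRECONDITION & SPEC =====
def Spec_build_summary_by_repo_and_rule (findings : List (List (String × String))) (out : List (String × List (String × Int))) : Prop := out = build_summary_by_repo_and_rule_alt findings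
instance (findings : List (List (String × String))) (out : List (String × List (String × Int))) : Decidable (Spec_build_summary_by_repo_and_rule findings out) := by unfold Spec_build_summary_by_repo_and_rule; infer_instance

-- ===== CLAIM (what is proved, stated in full; the proofs are below) =====
def Claim_equal_build_summary_by_repo_and_rule : Prop := ∀ (findings : List (List (String × String))), Dom_build_summary_by_repo_and_rule findings → Spec_build_summary_by_repo_and_rule findings (build_summary_by_repo_and_rule findings)

-- ===== LEMMAS AND PROOFS =====

-- the valid (repo, rule_id) pairs both programs act on
def pvPairOf (f : List (String × String)) : String × String :=
  (pvGetOrEmpty f "repo", pvGetOrEmpty f "rule_id")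

def pvKeep (f : List (String × String)) : Bool :=
  !(pvGetOrEmpty f "repo" == "" || pvGetOrEmpty f "rule_id" == "")

def pvPairs (findings : List (List (String × String))) : List (String × String) :=
  (findings.filter pvKeep).map pvPairOf

-- A's nested builder, abstracted over the pair list
def pvNest (ps : List (String × String)) : PySem.Dict String (PySem.Dict String Int) :=
  ps.foldl (fun d p => d.insert p.1 ((d.getD p.1 PySem.Dict.empty).modify p.2 0 (· + 1))) PySem.Dict.empty

-- B's inner per-repo table, abstracted over the pair list
def pvInner (ps : List (String × String)) (repo : String) : List (String × Int) :=
  (PySem.List.dedup ((ps.filter (fun p => p.1 == repo)).map (·.2))).map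
    (fun rule => (rule, (PySem.List.count ps (repo, rule) : Int)))

theorem pvPairs_cons (f : List (String × String)) (l : List (List (String × String))) :
    pvPairs (f :: l) = if pvKeep f then pvPairOf f :: pvPairs l else pvPairs l := by
  by_cases hk : pvKeep f = true <;> simp [pvPairs, hk]

theorem pvA_fold (l : List (List (String × String))) (d : PySem.Dict String (PySem.Dict String Int)) :
    l.foldl (fun d f =>
      let repo := pvGetOrEmpty f "repo"
      let rule_id := pvGetOrEmpty f "rule_id"
      if repo == "" || rule_id == "" then d
      else d.insert repo ((d.getD repo PySem.Dict.empty).modify rule_id 0 (· + 1))) d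
    = (pvPairs l).foldl
        (fun d p => d.insert p.1 ((d.getD p.1 PySem.Dict.empty).modify p.2 0 (· + 1))) d := by
  induction l generalizing d with
  | nil => rfl
  | cons f l ih =>
    rw [List.foldl_cons, ih]
    by_cases hk : pvKeep f = true
    · have hc : (pvGetOrEmpty f "repo" == "" || pvGetOrEmpty f "rule_id" == "") = false := by
        simpa [pvKeep] using hk
      simp [pvPairs_cons, hk, hc, pvPairOf]
    · have hk' : pvKeep f = false := by simpa using hk
      have hc : (pvGetOrEmpty f "repo" == "" || pvGetOrEmpty f "rule_id" == "") = true := by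
        rw [pvKeep] at hk'; simp only [Bool.not_eq_false'] at hk'; exact hk'
      simp [pvPairs_cons, hk', hc]

theorem pvB_fold (l : List (List (String × String))) (acc : List (String × String)) :
    l.foldl (fun acc f =>
      let repo := pvGetOrEmpty f "repo"
      let rule_id := pvGetOrEmpty f "rule_id"
      if (repo != "") && (rule_id != "") then acc ++ [(repo, rule_id)] else acc) acc
    = acc ++ pvPairs l := by
  induction l generalizing acc with
  | nil => simp [pvPairs]
  | cons f l ih =>
    rw [List.foldl_cons, ih]
    by_cases hk : pvKeep f = true
    · have hb : ((pvGetOrEmpty f "repo" != "") && (pvGetOrEmpty f "rule_id" != "")) = true := by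
        simpa [pvKeep, Bool.not_or] using hk
      simp [pvPairs_cons, hk, hb, pvPairOf]
    · have hk' : pvKeep f = false := by simpa using hk
      have hb : ((pvGetOrEmpty f "repo" != "") && (pvGetOrEmpty f "rule_id" != "")) = false := by
        simpa [pvKeep, Bool.not_or] using hk'
      simp [pvPairs_cons, hk', hb]

theorem pvNest_keys (ps : List (String × String)) :
    (pvNest ps).keys = PySem.List.dedup (ps.map (·.1)) := by
  rw [pvNest, PySem.Dict.keys_foldl_insert_key ps (fun p => p.1)
    (fun d p => (d.getD p.1 PySem.Dict.empty).modify p.2 0 (· + 1)) PySem.Dict.empty]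
  rfl

theorem pvNest_keys_nodup (ps : List (String × String)) : (pvNest ps).keys.Nodup := by
  rw [pvNest_keys]
  exact PySem.Set.nodup_ofList _

theorem pvNest_append (ps : List (String × String)) (x : String × String) :
    pvNest (ps ++ [x])
      = (pvNest ps).insert x.1 (((pvNest ps).getD x.1 PySem.Dict.empty).modify x.2 0 (· + 1)) := by
  simp [pvNest, List.foldl_append]

theorem pvNest_getD_items (ps : List (String × String)) (r : String) :
    ((pvNest ps).getD r PySem.Dict.empty).items = pvInner ps r := by
  induction ps using List.reverseRecOn with
  | nil => rfl
  | append_singleton ps x ih =>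
    obtain ⟨r0, u0⟩ := x
    rw [pvNest_append]
    by_cases hr : r = r0
    · subst hr
      set inner := (pvNest ps).getD r PySem.Dict.empty
      set F := (ps.filter (fun p => p.1 == r)).map (·.2) with hF
      have hFx : ((ps ++ [(r, u0)]).filter (fun p => p.1 == r)).map (·.2) = F ++ [u0] := by
        simp [List.filter_append, hF]
      have hkeys : inner.keys = PySem.List.dedup F := by
        have : inner.keys = inner.items.map (·.1) := rfl
        rw [this, ih, pvInner, List.map_map]
        simp [Function.comp_def, ← hF]
      have hnd : (PySem.List.dedup F).Nodup := PySem.Set.nodup_ofList F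
      have hcntx : ∀ u : String,
          List.count (r, u) (ps ++ [(r, u0)])
            = List.count (r, u) ps + (if u = u0 then 1 else 0) := by
        intro u
        rw [List.count_append, List.count_singleton]
        by_cases h : u = u0
        · simp [h]
        · have hb : ((r, u0) == (r, u)) = false := by
            rw [beq_eq_false_iff_ne]
            exact fun hh => h (congrArg Prod.snd hh).symm
          simp [hb, h]
      by_cases hu : u0 ∈ F
      · have hcont : inner.contains u0 = true := by
          rw [PySem.Dict.contains_iff_mem_keys, hkeys]
          exact (PySem.Set.mem_ofList F u0).mpr hu
        have hmem : (u0, (PySem.List.count ps (r, u0) : Int)) ∈ inner.items := by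
          rw [ih, pvInner]
          exact List.mem_map_of_mem ((PySem.Set.mem_ofList F u0).mpr hu)
        have hget : inner.getD u0 0 = (PySem.List.count ps (r, u0) : Int) :=
          PySem.Dict.getD_of_mem_items inner hmem (hkeys ▸ hnd) 0
        have hded : PySem.List.dedup (F ++ [u0]) = PySem.List.dedup F := by
          rw [show PySem.List.dedup (F ++ [u0]) = PySem.Set.ofList (F ++ [u0]) from rfl,
            PySem.Set.ofList_append_singleton]
          simp [PySem.Set.add, (PySem.Set.mem_ofList F u0).mpr hu]
      -- summary[r][u0] += 1 : modify is insert of the bumped count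
        rw [PySem.Dict.getD_insert_self,
          show inner.modify u0 0 (· + 1) = inner.insert u0 (inner.getD u0 0 + 1) from rfl,
          PySem.Dict.items_insert_of_contains inner _ hcont, ih, pvInner, pvInner, hFx, hded,
          List.map_map]
        apply List.map_congr_left
        intro u huR
        by_cases h : u = u0
        · subst h
          simp [hget, hcntx]
        · have hb : (u == u0) = false := by simp [h]
          simp [hcntx, h]
      · have hcont : inner.contains u0 = false := by
          rw [← Bool.not_eq_true, PySem.Dict.contains_iff_mem_keys, hkeys]
          intro hmem
          exact hu ((PySem.Set.mem_ofList F u0).mp hmem)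
        have hget : inner.getD u0 0 = 0 := PySem.Dict.getD_of_not_contains inner 0 hcont
        have hded : PySem.List.dedup (F ++ [u0]) = PySem.List.dedup F ++ [u0] := by
          rw [show PySem.List.dedup (F ++ [u0]) = PySem.Set.ofList (F ++ [u0]) from rfl,
            PySem.Set.ofList_append_singleton]
          have : u0 ∉ PySem.Set.ofList F := fun h => hu ((PySem.Set.mem_ofList F u0).mp h)
          simp [PySem.Set.add, this]
        have hzero : List.count (r, u0) ps = 0 := by
          rw [List.count_eq_zero]
          intro hmem
          exact hu (List.mem_map_of_mem (List.mem_filter.mpr ⟨hmem, by simp⟩))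
        rw [PySem.Dict.getD_insert_self,
          show inner.modify u0 0 (· + 1) = inner.insert u0 (inner.getD u0 0 + 1) from rfl,
          PySem.Dict.items_insert_of_not_contains inner _ hcont, ih, pvInner, pvInner, hFx, hded,
          List.map_append]
        congr 1
        · apply List.map_congr_left
          intro u huR
          have hne : u ≠ u0 := fun h => hu (h ▸ ((PySem.Set.mem_ofList F u).mp huR))
          simp [hcntx, hne]
        · simp [hget, hcntx, hzero]
    · rw [PySem.Dict.getD_insert_of_ne _ _ _ hr, ih, pvInner, pvInner]
      have hFeq : ((ps ++ [(r0, u0)]).filter (fun p => p.1 == r)).map (·.2)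
          = (ps.filter (fun p => p.1 == r)).map (·.2) := by
        have : (r0 == r) = false := by simp [Ne.symm hr]
        simp [List.filter_append, this]
      rw [hFeq]
      apply List.map_congr_left
      intro u _
      have : List.count (r, u) (ps ++ [(r0, u0)]) = List.count (r, u) ps := by
        rw [List.count_append, List.count_singleton]
        have : ((r0, u0) == (r, u)) = false := by
          simp [Prod.ext_iff]
          intro h
          exact absurd h.symm hr
        simp [this]
      simp [this]

theorem pv_main (ps : List (String × String)) :
    (pvNest ps).items.map (fun q => (q.1, q.2.items))
      = (PySem.List.dedup (ps.map (·.1))).map (fun r => (r, pvInner ps r)) := by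
  rw [PySem.Dict.items_eq_map_keys (pvNest ps) (pvNest_keys_nodup ps) PySem.Dict.empty,
    List.map_map, pvNest_keys]
  exact List.map_congr_left (fun r _ => by simp [pvNest_getD_items])

-- ===== VERDICT (by name: the statement is the Claim_ definition above) =====
theorem build_summary_by_repo_and_rule_spec : Claim_equal_build_summary_by_repo_and_rule := by
  intro findings _
  unfold Spec_build_summary_by_repo_and_rule
  show build_summary_by_repo_and_rule findings = build_summary_by_repo_and_rule_alt findings
  rw [build_summary_by_repo_and_rule, build_summary_by_repo_and_rule_alt]
  rw [pvA_fold, pvB_fold]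
  rw [List.nil_append]
  exact pv_main (pvPairs findings)
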